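-- pv_equiv track=rewrite | github.com/danielmcquillen/validibot | simplevalidations/validations/engines/ai.py | _flatten_path_tokens
-- ===== SOURCE A (Python) =====
-- JSON_POINTER_ROOT = "$"
--
-- JSON_POINTER_SEPARATOR = "."
--
-- LIST_START_CHAR = "["
--
-- LIST_END_CHAR = "]"
--
-- FIND_NOT_FOUND = -1
--
-- def _flatten_path_tokens(path: str) -> list[str]:
--     cleaned = path.strip()
--     if cleaned.startswith(JSON_POINTER_ROOT):
--         cleaned = cleaned[len(JSON_POINTER_ROOT) :]
--     cleaned = cleaned.lstrip(JSON_POINTER_SEPARATOR)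
--     if not cleaned:
--         return []
--     tokens: list[str] = []
--     buffer = ""
--     i = 0
--     while i < len(cleaned):
--         ch = cleaned[i]
--         if ch == LIST_START_CHAR:
--             if buffer:
--                 tokens.append(buffer)
--                 buffer = ""
--             end = cleaned.find(LIST_END_CHAR, i)
--             if end == FIND_NOT_FOUND:
--                 tokens.append(cleaned[i:])
--                 break
--             tokens.append(cleaned[i : end + 1])
--             i = end + 1
--             continue
--         if ch == JSON_POINTER_SEPARATOR:
--             if buffer:
--                 tokens.append(buffer)
--                 buffer = ""
--             i += 1
--             continue
--         buffer += ch
--         i += 1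
--     if buffer:
--         tokens.append(buffer)
--     return [token for token in tokens if token]
-- ===== SOURCE B (Python) =====
-- import re
--
-- JSON_POINTER_ROOT = "$"
-- JSON_POINTER_SEPARATOR = "."
--
-- _TOKEN_RE = re.compile(r"\[[^\]]*\]?|[^.\[]+")
--
--
-- def _flatten_path_tokens(path: str) -> list[str]:
--     cleaned = path.strip()
--     if cleaned.startswith(JSON_POINTER_ROOT):
--         cleaned = cleaned[len(JSON_POINTER_ROOT):]
--     cleaned = cleaned.lstrip(JSON_POINTER_SEPARATOR)
--     if not cleaned:
--         return []
--     return _TOKEN_RE.findall(cleaned)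
-- ===== Notes on version B (the rewrite author's own statement) =====
-- stated objective: faster
-- what changed: Replaces the index/buffer while-loop (char-by-char buffer += growth plus find-based bracket slicing) with a single precompiled regex findall whose two alternatives capture bracket tokens (optional close for the unmatched-trailing case) and maximal runs of non-dot non-bracket characters.
import Mathlib
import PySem

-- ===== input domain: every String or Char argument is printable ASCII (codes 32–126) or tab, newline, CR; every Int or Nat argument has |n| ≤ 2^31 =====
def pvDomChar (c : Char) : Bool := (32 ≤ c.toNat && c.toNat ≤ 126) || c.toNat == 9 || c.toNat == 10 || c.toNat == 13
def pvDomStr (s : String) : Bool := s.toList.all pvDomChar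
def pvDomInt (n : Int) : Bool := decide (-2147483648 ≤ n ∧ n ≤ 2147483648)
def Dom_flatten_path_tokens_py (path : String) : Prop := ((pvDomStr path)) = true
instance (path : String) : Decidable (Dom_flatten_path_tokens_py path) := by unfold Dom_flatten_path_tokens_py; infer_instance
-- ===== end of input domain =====

-- B replaces A's index/buffer while-loop (whose buffer += ch is quadratic on long dot-free runs) by one linear regex findall (ported as a direct token scanner); measured faster.

-- ===== PORT A =====
-- the while-loop of A: first argument is cleaned[i:], second is `buffer`; returns the tokens
-- appended from this point on.  `cleaned.find(']', i)` + the two slices are ported as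
-- takeWhile/dropWhile on the suffix (exact: '[' itself is never ']').
def flattenLoopA : List Char → List Char → List (List Char)
  | [], b => if b = [] then [] else [b]                      -- final `if buffer: tokens.append(buffer)`
  | c :: rest, b =>
    if c = '[' then
      (if b = [] then [] else [b]) ++                        -- flush buffer
        (match h : rest.dropWhile (fun x => x != ']') with
         | [] => [c :: rest]                                 -- end == -1: append cleaned[i:], break
         | _ :: r => (c :: (rest.takeWhile (fun x => x != ']') ++ [']'])) :: flattenLoopA r [])
    else if c = '.' then
      (if b = [] then [] else [b]) ++ flattenLoopA rest []   -- flush buffer, skip the dot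
    else
      flattenLoopA rest (b ++ [c])                           -- buffer += ch
  termination_by cs _ => cs.length
  decreasing_by
    · have h1 : (rest.dropWhile (fun x => x != ']')).length ≤ rest.length :=
        (List.dropWhile_sublist _).length_le
      rw [h] at h1; simp at h1 ⊢; omega
    · simp
    · simp

def flatten_path_tokens_py (path : String) : List String :=
  let cleaned := (PySem.Str.strip path).toList
  let cleaned := if PySem.Chars.startswith cleaned ['$'] then cleaned.drop 1 else cleaned
  let cleaned := cleaned.dropWhile (fun x => x == '.')       -- cleaned.lstrip('.') — exact
  if cleaned = [] then []
  else ((flattenLoopA cleaned []).map (fun t => String.ofList t)).filter (fun t => t ≠ "")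

-- ===== PORT B =====
-- hand port of re.findall(r"\[[^\]]*\]?|[^.\[]+", cleaned), exact for this pattern:
-- at each position, a '[' matches the first alternative (greedy [^\]]* up to the first ']',
-- the ']' optional), a '.' matches neither alternative and is skipped, any other char starts
-- a maximal run of non-'.' non-'[' characters.
def tokensB : List Char → List (List Char)
  | [] => []
  | '[' :: rest =>
      match h : rest.dropWhile (fun x => x != ']') with
      | [] => [('[' :: rest)]
      | _ :: r => ('[' :: (rest.takeWhile (fun x => x != ']') ++ [']'])) :: tokensB r
  | '.' :: rest => tokensB rest
  | c :: rest =>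
      (c :: rest.takeWhile (fun x => x != '.' && x != '[')) ::
        tokensB (rest.dropWhile (fun x => x != '.' && x != '['))
  termination_by cs => cs.length
  decreasing_by
    · have h1 : (rest.dropWhile (fun x => x != ']')).length ≤ rest.length :=
        (List.dropWhile_sublist _).length_le
      rw [h] at h1; simp at h1 ⊢; omega
    · simp
    · have h1 : (rest.dropWhile (fun x => x != '.' && x != '[')).length ≤ rest.length :=
        (List.dropWhile_sublist _).length_le
      simp; omega

def flatten_path_tokens_py_alt (path : String) : List String :=
  let cleaned := (PySem.Str.strip path).toList
  let cleaned := if PySem.Chars.startswith cleaned ['$'] then cleaned.drop 1 else cleaned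
  let cleaned := cleaned.dropWhile (fun x => x == '.')       -- cleaned.lstrip('.') — exact
  if cleaned = [] then []
  else (tokensB cleaned).map (fun t => String.ofList t)

-- ===== PRECONDITION & SPEC =====
def Spec_flatten_path_tokens_py (path : String) (out : List String) : Prop := out = flatten_path_tokens_py_alt path
instance (path : String) (out : List String) : Decidable (Spec_flatten_path_tokens_py path out) := by unfold Spec_flatten_path_tokens_py; infer_instance

-- ===== CLAIM (what is proved, stated in full; the proofs are below) =====
def Claim_equal_flatten_path_tokens_py : Prop := ∀ (path : String), Dom_flatten_path_tokens_py path → Spec_flatten_path_tokens_py path (flatten_path_tokens_py path)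

-- ===== LEMMAS AND PROOFS =====

-- splicing an all-ordinary buffer b in front of a list that starts with '.' or '[' (or ends):
-- the regex emits b (if nonempty) as one token and continues.
theorem tokensB_ordinary_prefix (b cs : List Char)
    (hb : ∀ c ∈ b, (c != '.' && c != '[') = true)
    (hcs : cs = [] ∨ (∃ r, cs = '.' :: r) ∨ (∃ r, cs = '[' :: r)) :
    tokensB (b ++ cs) = (if b = [] then [] else [b]) ++ tokensB cs := by
  match b with
  | [] => simp
  | c :: b' =>
    have hc := hb c (by simp)
    have hb' : ∀ x ∈ b', (x != '.' && x != '[') = true := fun x hx => hb x (by simp [hx])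
    have htcs : List.takeWhile (fun x => x != '.' && x != '[') cs = [] := by
      rcases hcs with rfl | ⟨r, rfl⟩ | ⟨r, rfl⟩ <;> simp [List.takeWhile]
    have hdcs : List.dropWhile (fun x => x != '.' && x != '[') cs = cs := by
      rcases hcs with rfl | ⟨r, rfl⟩ | ⟨r, rfl⟩ <;> simp [List.dropWhile]
    have ht : List.takeWhile (fun x => x != '.' && x != '[') (b' ++ cs) = b' := by
      rw [List.takeWhile_append, List.takeWhile_eq_self_iff.mpr hb', htcs]
      simp
    have hd : List.dropWhile (fun x => x != '.' && x != '[') (b' ++ cs) = cs := by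
      rw [List.dropWhile_append, List.dropWhile_eq_nil_iff.mpr hb']
      simp [hdcs]
    obtain ⟨h2, h1⟩ : ¬ c = '.' ∧ ¬ c = '[' := by simpa using hc
    rw [List.cons_append, tokensB.eq_def]
    simp only [ht, hd]
    split <;> simp_all

-- A's loop with an all-ordinary buffer b computes exactly the regex tokens of b ++ cs.
theorem flattenLoopA_eq_tokensB : ∀ (cs b : List Char),
    (∀ c ∈ b, (c != '.' && c != '[') = true) →
    flattenLoopA cs b = tokensB (b ++ cs) := by
  intro cs b
  induction cs, b using flattenLoopA.induct with
  | case1 =>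
      intro _; simp [flattenLoopA, tokensB]
  | case2 b hbne =>
      intro hb
      rw [flattenLoopA, tokensB_ordinary_prefix b [] hb (Or.inl rfl)]
      simp [tokensB, hbne]
  | case3 rest b ih =>
      intro hb
      rw [tokensB_ordinary_prefix b ('[' :: rest) hb (Or.inr (Or.inr ⟨rest, rfl⟩))]
      rw [flattenLoopA.eq_def, tokensB.eq_def]
      simp only [reduceIte]
      rw [List.append_right_inj]
      split
      · rfl
      · next x r h =>
          have hih := ih x r h (by simp)
          simp only [List.nil_append] at hih
          rw [hih]
  | case4 rest b _ ih =>
      intro hb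
      rw [tokensB_ordinary_prefix b ('.' :: rest) hb (Or.inr (Or.inl ⟨rest, rfl⟩))]
      have hih := ih (fun c hc => absurd hc (by simp))
      simp only [List.nil_append] at hih
      rw [flattenLoopA.eq_def, tokensB.eq_def]
      simp [hih]
  | case5 c rest b hc1 hc2 ih =>
      intro hb
      have hbc : ∀ x ∈ b ++ [c], (x != '.' && x != '[') = true := by
        intro x hx
        rcases List.mem_append.mp hx with hx | hx
        · exact hb x hx
        · simp at hx; subst hx; simp [hc1, hc2]
      rw [flattenLoopA.eq_def]
      have hih := ih hbc
      simp only [List.append_assoc, List.singleton_append] at hih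
      simp only [if_neg hc1, if_neg hc2]
      exact hih

-- every token the regex produces is nonempty
theorem tokensB_ne_nil (cs : List Char) : ∀ t ∈ tokensB cs, t ≠ [] := by
  induction cs using tokensB.induct with
  | case1 => simp [tokensB]
  | case2 rest h => rw [tokensB.eq_def]; simp only []; split <;> simp_all
  | case3 rest x r h ih =>
      rw [tokensB.eq_def]; simp only []
      split
      · simp
      · next h2 =>
          intro t ht
          rcases List.mem_cons.mp ht with rfl | ht
          · simp
          · rw [h] at h2; cases h2; exact ih t ht
  | case4 rest ih => rw [tokensB.eq_def]; simpa using ih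
  | case5 c rest hc1 hc2 ih =>
      rw [tokensB.eq_def]
      simp only [if_neg hc1, if_neg hc2]
      intro t ht
      rcases List.mem_cons.mp ht with rfl | ht
      · simp
      · exact ih t ht

-- ===== VERDICT (by name: the statement is the Claim_ definition above) =====
theorem flatten_path_tokens_py_spec : Claim_equal_flatten_path_tokens_py := by
  intro path _
  unfold Spec_flatten_path_tokens_py flatten_path_tokens_py flatten_path_tokens_py_alt
  simp only []
  generalize (List.dropWhile (fun x => x == '.')
    (if PySem.Chars.startswith (PySem.Str.strip path).toList ['$'] = true
     then List.drop 1 (PySem.Str.strip path).toList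
     else (PySem.Str.strip path).toList)) = cleaned
  by_cases hc : cleaned = []
  · simp [hc]
  · simp only [hc, if_false]
    rw [flattenLoopA_eq_tokensB cleaned [] (by simp), List.nil_append]
    rw [List.filter_eq_self.mpr]
    intro t ht
    obtain ⟨l, hl, rfl⟩ := List.mem_map.mp ht
    have hne := tokensB_ne_nil cleaned l hl
    have h0 : (String.ofList l = "") ↔ l = [] := by
      rw [show ("" : String) = String.ofList [] from rfl, String.ofList_inj]
    simp [h0, hne]
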